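-- pv_equiv track=rewrite | github.com/matchaboar/srajob2 | job_scrape_application/workflows/site_handlers/paloalto_networks.py | filter_job_urls
-- ===== SOURCE A (Python) =====
-- from typing import Any, Dict, List
--
-- PALOALTO_HOST = "jobs.paloaltonetworks.com"
--
-- JOB_PATH_TOKEN = "/job/"
--
-- def filter_job_urls(urls: List[str]) -> List[str]:
--     filtered: List[str] = []
--     seen: set[str] = set()
--     for url in urls:
--         if not isinstance(url, str):
--             continue
--         cleaned = url.strip()
--         if not cleaned or cleaned in seen:
--             continue
--         lower = cleaned.lower()
--         if PALOALTO_HOST not in lower: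
--             continue
--         if JOB_PATH_TOKEN not in lower:
--             continue
--         seen.add(cleaned)
--         filtered.append(cleaned)
--     return filtered
-- ===== SOURCE B (Python) =====
-- from typing import List
--
-- PALOALTO_HOST = "jobs.paloaltonetworks.com"
-- JOB_PATH_TOKEN = "/job/"
--
-- def filter_job_urls(urls: List[str]) -> List[str]:
--     kept = [c for c in (u.strip() for u in urls if isinstance(u, str))
--             if c and PALOALTO_HOST in c.lower() and JOB_PATH_TOKEN in c.lower()]
--     # delete-ahead dedup: take the head, erase all its later copies, repeat.
--     out: List[str] = []
--     rest = kept
--     while rest: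
--         head = rest[0]
--         out.append(head)
--         rest = [x for x in rest[1:] if x != head]
--     return out
-- ===== Notes on version B (the rewrite author's own statement) =====
-- stated objective: alternative
-- what changed: B first builds the filtered list with comprehensions and then deduplicates it by a delete-ahead loop (take the head, erase all its later copies from the remainder, repeat) using no set/dict membership structure at all, instead of A's single pass with an inline seen-set.
import Mathlib
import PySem

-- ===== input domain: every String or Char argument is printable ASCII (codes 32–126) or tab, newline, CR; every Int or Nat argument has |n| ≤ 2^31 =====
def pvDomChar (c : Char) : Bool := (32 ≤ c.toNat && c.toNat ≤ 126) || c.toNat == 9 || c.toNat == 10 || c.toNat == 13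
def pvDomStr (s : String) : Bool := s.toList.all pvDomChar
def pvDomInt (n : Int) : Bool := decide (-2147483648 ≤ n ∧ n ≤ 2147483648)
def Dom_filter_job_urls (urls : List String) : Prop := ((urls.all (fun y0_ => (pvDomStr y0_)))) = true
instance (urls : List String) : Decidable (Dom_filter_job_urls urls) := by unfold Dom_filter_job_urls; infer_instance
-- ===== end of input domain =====

-- B filters with comprehensions and then deduplicates by a delete-ahead loop (no set/dict
-- structure), instead of A's single pass with an inline seen-set; alternative decomposition.

def pvHost : String := "jobs.paloaltonetworks.com"
def pvTok : String := "/job/"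

-- ===== PORT A =====
-- one loop: strip, skip empty/seen, check both substrings, append + record in seen
def stepA (st : List String × PySem.Set String) (url : String) : List String × PySem.Set String :=
  let cleaned := PySem.Str.strip url
  if cleaned == "" || PySem.Set.contains st.2 cleaned then st
  else
    let lower := PySem.Str.lower cleaned
    if !(PySem.Str.isIn pvHost lower) then st
    else if !(PySem.Str.isIn pvTok lower) then st
    else (st.1 ++ [cleaned], PySem.Set.add st.2 cleaned)

def filter_job_urls (urls : List String) : List String :=
  (urls.foldl stepA ([], PySem.Set.empty)).1

-- ===== PORT B =====
def keepB (cleaned : String) : Bool :=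
  !(cleaned == "") &&
    (let lower := PySem.Str.lower cleaned
     PySem.Str.isIn pvHost lower && PySem.Str.isIn pvTok lower)

-- the while loop of Source B: out accumulator, erase the head's later copies, repeat
def dedupLoop (out : List String) (rest : List String) : List String :=
  match rest with
  | [] => out
  | head :: tail => dedupLoop (out ++ [head]) (tail.filter (fun x => x != head))
termination_by rest.length
decreasing_by
  simpa using Nat.lt_succ_of_le (List.length_filter_le _ _)

def filter_job_urls_alt (urls : List String) : List String :=
  dedupLoop [] ((urls.map PySem.Str.strip).filter keepB)

-- ===== PRECONDITION & SPEC =====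
def Spec_filter_job_urls (urls : List String) (out : List String) : Prop := out = filter_job_urls_alt urls
instance (urls : List String) (out : List String) : Decidable (Spec_filter_job_urls urls out) := by unfold Spec_filter_job_urls; infer_instance

-- ===== CLAIM =====
def Claim_equal_filter_job_urls : Prop := ∀ (urls : List String), Dom_filter_job_urls urls → Spec_filter_job_urls urls (filter_job_urls urls)

-- ===== LEMMAS AND PROOFS =====

-- A's loop, run from a paired state (f, f), computes the fold of Set.add over B's filtered list.
lemma loopA_eq (urls : List String) (f : List String) :
    (urls.foldl stepA (f, f)).1
      = ((urls.map PySem.Str.strip).filter keepB).foldl PySem.Set.add f := by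
  induction urls generalizing f with
  | nil => rfl
  | cons u rest ih =>
    by_cases hempty : PySem.Str.strip u = ""
    · simp [stepA, keepB, hempty, ih]
    · by_cases hmem : PySem.Str.strip u ∈ f
      · have hadd : PySem.Set.add f (PySem.Str.strip u) = f := by
          simp [PySem.Set.add, hmem]
        by_cases hhost : PySem.Str.isIn pvHost (PySem.Str.lower (PySem.Str.strip u)) = true <;>
          by_cases htok : PySem.Str.isIn pvTok (PySem.Str.lower (PySem.Str.strip u)) = true <;>
          simp at hhost htok <;>
          simp [stepA, keepB, hempty, hmem, hhost, htok, ih]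
      · have hadd : PySem.Set.add f (PySem.Str.strip u) = f ++ [PySem.Str.strip u] := by
          simp [PySem.Set.add, hmem]
        by_cases hhost : PySem.Str.isIn pvHost (PySem.Str.lower (PySem.Str.strip u)) = true <;>
          by_cases htok : PySem.Str.isIn pvTok (PySem.Str.lower (PySem.Str.strip u)) = true <;>
          simp at hhost htok <;>
          simp [stepA, keepB, hempty, hmem, hhost, htok, ih]

-- folding Set.add over xs equals B's delete-ahead loop started on xs purged of f's elements
lemma dedupLoop_cons (out : List String) (h : String) (t : List String) :
    dedupLoop out (h :: t) = dedupLoop (out ++ [h]) (t.filter (fun x => x != h)) := by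
  rw [dedupLoop.eq_def]

lemma setfold_eq_dedupLoop (xs : List String) (f : List String) :
    xs.foldl PySem.Set.add f = dedupLoop f (xs.filter (fun x => !(f.contains x))) := by
  induction xs generalizing f with
  | nil => simp [dedupLoop]
  | cons h t ih =>
    by_cases hmem : h ∈ f
    · have hc : f.contains h = true := by simpa using hmem
      have hadd : PySem.Set.add f h = f := by simp [PySem.Set.add, hmem]
      rw [List.foldl_cons, hadd, ih]
      simp [hmem]
    · have hc : f.contains h = false := by simpa using hmem
      have hadd : PySem.Set.add f h = f ++ [h] := by simp [PySem.Set.add, hmem]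
      have hfil : (h :: t).filter (fun x => !(f.contains x))
          = h :: t.filter (fun x => !(f.contains x)) := by
        simp [hmem]
      rw [List.foldl_cons, hadd, ih, hfil, dedupLoop_cons, List.filter_filter]
      congr 1
      apply List.filter_congr
      intro x _
      by_cases hx : x = h <;> simp [hx]

-- ===== VERDICT =====
theorem filter_job_urls_spec : Claim_equal_filter_job_urls := by
  intro urls _
  unfold Spec_filter_job_urls filter_job_urls filter_job_urls_alt
  have h1 := loopA_eq urls []
  have h2 := setfold_eq_dedupLoop ((urls.map PySem.Str.strip).filter keepB) []
  simp only [List.contains_nil, Bool.not_false, List.filter_true] at h2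
  exact h1.trans h2
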